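-- pv_equiv track=rewrite | github.com/Cocon-Se/gpyrobotstxt | pyrobotstxt/robots_cc.py | extract_user_agent_rfc7231
-- ===== SOURCE A (Python) =====
-- def extract_user_agent_rfc7231(user_agent: str):
--     # extract_user_agent extracts the matchable part of a user agent string,
--     # essentially stopping at the first invalid character.
--     # Example: 'Googlebot/2.1' becomes 'Googlebot'
--
--     # Allowed characters in user-agent are [a-zA-Z_-].
--     #
--     # Bugfix:
--     #
--     # According to RFC 7231, the 'product'  part of the user-agent
--     # is defined as a 'token', which allows:
--     #
--     #  "!" / "#" / "$" / "%" / "&" / "'" / "*"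
--     #  / "+" / "-" / "." / "^" / "_" / "`" / "|" / "~"
--     #  / DIGIT / ALPHA
--     #
--     # See https://httpwg.org/specs/rfc7231.html#header.user-agent
--
--     def ascii_is_alpha(c):
--         return "a" <= c <= "z" or "A" <= c <= "Z"
--
--     def ascii_is_numeric(c):
--         return "0" <= c <= "9"
--
--     def ascii_is_special(c):
--         allowed = "~#$%'*+-.^_`|~"
--         return c in allowed
--
--     i = 0
--     while i < len(user_agent):
--         c = user_agent[i]
--         if (
--             not ascii_is_alpha(c)
--             and not ascii_is_numeric(c)
--             and not ascii_is_special(c)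
--         ):
--             break
--         i += 1
--
--     return user_agent[:i]
-- ===== SOURCE B (Python) =====
-- import re
--
-- # Anchored regex whose character class lists exactly the original's allowed
-- # characters: ALPHA, DIGIT and the literal specials ~ # $ % ' * + - . ^ _ ` |
-- # (the original's set deliberately omits '!' and '&').  A greedy '[...]*'
-- # matched from the start is precisely "longest prefix of allowed characters".
-- _TOKEN_RE = re.compile(r"[A-Za-z0-9~#$%'*+\-.^_`|]*")
--
-- def extract_user_agent_rfc7231(user_agent: str):
--     return _TOKEN_RE.match(user_agent).group(0)
-- ===== Notes on version B (the rewrite author's own statement) =====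
-- stated objective: idiomatic
-- what changed: Replaces the explicit index while-loop with three character-class helper predicates by one anchored regular expression [allowed]* matched from the start, letting the regex engine find the token boundary in a single compiled-automaton pass.
import Mathlib
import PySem

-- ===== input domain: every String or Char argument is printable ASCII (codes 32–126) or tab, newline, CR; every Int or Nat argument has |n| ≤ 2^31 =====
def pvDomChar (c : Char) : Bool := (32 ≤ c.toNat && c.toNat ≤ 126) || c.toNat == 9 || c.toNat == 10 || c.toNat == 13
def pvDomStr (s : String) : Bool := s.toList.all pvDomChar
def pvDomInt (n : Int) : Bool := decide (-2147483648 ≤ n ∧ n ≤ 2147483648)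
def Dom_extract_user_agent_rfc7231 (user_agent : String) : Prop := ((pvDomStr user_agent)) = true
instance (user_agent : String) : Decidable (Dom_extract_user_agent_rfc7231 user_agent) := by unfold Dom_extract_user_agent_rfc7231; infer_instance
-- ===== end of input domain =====

-- B replaces A's index-based while-loop with three predicate helpers by one anchored
-- regular expression [allowed]* matched from the start (same O(n), different mechanism).

-- ===== PORT A =====
def pvAsciiIsAlpha (c : Char) : Bool :=
  decide ('a' ≤ c ∧ c ≤ 'z') || decide ('A' ≤ c ∧ c ≤ 'Z')

def pvAsciiIsNumeric (c : Char) : Bool :=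
  decide ('0' ≤ c ∧ c ≤ '9')

-- the characters of A's literal "~#$%'*+-.^_`|~" (duplicate '~' kept)
def pvSpecialChars : List Char :=
  ['~','#','$','%','\'','*','+','-','.','^','_','`','|','~']

-- Python's `c in allowed`: c is a single character, so the substring test is
-- exactly membership of c among allowed's characters (exact on one-char needles).
def pvAsciiIsSpecial (c : Char) : Bool := pvSpecialChars.contains c

-- the while-loop: advance i while the character is allowed, stop at the first that is not
def pvALoop (cs : List Char) (i : Nat) : Nat :=
  if h : i < cs.length then
    let c := cs[i]
    if !pvAsciiIsAlpha c && !pvAsciiIsNumeric c && !pvAsciiIsSpecial c then i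
    else pvALoop cs (i + 1)
  else i
termination_by cs.length - i

def extract_user_agent_rfc7231 (user_agent : String) : String :=
  String.ofList (PySem.List.slice user_agent.toList none
    (some ((pvALoop user_agent.toList 0 : Nat) : Int)))   -- user_agent[:i]

-- ===== PORT B =====
-- the character class of B's regex [A-Za-z0-9~#$%'*+\-.^_`|], ranges expanded
def pvTokenClass (c : Char) : Bool :=
  decide ('A' ≤ c ∧ c ≤ 'Z') || decide ('a' ≤ c ∧ c ≤ 'z') || decide ('0' ≤ c ∧ c ≤ '9')
  || ['~','#','$','%','\'','*','+','-','.','^','_','`','|'].contains c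

-- the regex engine's greedy star over a one-character-class pattern, anchored at the
-- start (re.match): consume while the next character is in the class, emit the match
def pvReStarMatch (cs : List Char) : List Char :=
  match cs with
  | [] => []
  | c :: rest => if pvTokenClass c then c :: pvReStarMatch rest else []

def extract_user_agent_rfc7231_alt (user_agent : String) : String :=
  String.ofList (pvReStarMatch user_agent.toList)   -- match.group(0)

-- ===== PRECONDITION & SPEC =====
def Spec_extract_user_agent_rfc7231 (user_agent : String) (out : String) : Prop := out = extract_user_agent_rfc7231_alt user_agent
instance (user_agent : String) (out : String) : Decidable (Spec_extract_user_agent_rfc7231 user_agent out) := by unfold Spec_extract_user_agent_rfc7231; infer_instance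

-- ===== CLAIM (what is proved, stated in full; the proofs are below) =====
def Claim_equal_extract_user_agent_rfc7231 : Prop := ∀ (user_agent : String), Dom_extract_user_agent_rfc7231 user_agent → Spec_extract_user_agent_rfc7231 user_agent (extract_user_agent_rfc7231 user_agent)

-- ===== LEMMAS AND PROOFS =====

-- A's continue-condition, as a single predicate
def pvAllowed (c : Char) : Bool :=
  pvAsciiIsAlpha c || pvAsciiIsNumeric c || pvAsciiIsSpecial c

theorem pvBreak_eq_not_allowed (c : Char) :
    (!pvAsciiIsAlpha c && !pvAsciiIsNumeric c && !pvAsciiIsSpecial c) = !pvAllowed c := by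
  simp [pvAllowed]

-- A's loop stops exactly after the longest allowed prefix starting at i
theorem pvALoop_eq (cs : List Char) (i : Nat) :
    pvALoop cs i = i + ((cs.drop i).takeWhile pvAllowed).length := by
  fun_induction pvALoop cs i with
  | case1 i h c hstop =>
    rw [List.drop_eq_getElem_cons h, List.takeWhile_cons]
    rw [pvBreak_eq_not_allowed] at hstop
    have hstop' : pvAllowed cs[i] = false := by simpa using hstop
    simp [hstop']
  | case2 i h c hgo ih =>
    rw [List.drop_eq_getElem_cons h, List.takeWhile_cons]
    rw [pvBreak_eq_not_allowed] at hgo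
    have hgo' : pvAllowed cs[i] = true := by simpa using hgo
    simp [hgo', ih]
    omega
  | case3 i h =>
    simp [List.drop_eq_nil_of_le (by omega : cs.length ≤ i)]

-- B's greedy star is the longest class-member prefix
theorem pvReStarMatch_eq_takeWhile (cs : List Char) :
    pvReStarMatch cs = cs.takeWhile pvTokenClass := by
  induction cs with
  | nil => rfl
  | cons c rest ih =>
    simp only [pvReStarMatch, List.takeWhile_cons]
    split <;> simp_all

-- takeWhile only looks at predicate values on the list's own elements
theorem pvTakeWhile_congr {p q : Char → Bool} {l : List Char} (h : ∀ a ∈ l, p a = q a) :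
    l.takeWhile p = l.takeWhile q := by
  induction l with
  | nil => rfl
  | cons a t ih =>
    simp only [List.takeWhile_cons, h a (List.mem_cons_self)]
    split
    · rw [ih (fun b hb => h b (List.mem_cons_of_mem a hb))]
    · rfl

theorem pvTake_length_takeWhile (p : Char → Bool) (l : List Char) :
    l.take (l.takeWhile p).length = l.takeWhile p := by
  nth_rewrite 2 [← List.takeWhile_append_dropWhile (p := p) (l := l)]
  exact List.take_left ..

-- on the ASCII domain, B's regex class is exactly A's continue-condition
set_option maxRecDepth 4096 in
theorem pvTokenClass_eq_allowed (c : Char) (h : c.toNat ≤ 126) :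
    pvTokenClass c = pvAllowed c := by
  have hc : Char.ofNat c.toNat = c := Char.ofNat_toNat c
  rw [← hc]
  interval_cases h' : c.toNat <;> decide

-- ===== VERDICT (by name: the statement is the Claim_ definition above) =====
theorem extract_user_agent_rfc7231_spec : Claim_equal_extract_user_agent_rfc7231 := by
  intro s hDom
  unfold Spec_extract_user_agent_rfc7231 extract_user_agent_rfc7231 extract_user_agent_rfc7231_alt
  have hsame : s.toList.takeWhile pvTokenClass = s.toList.takeWhile pvAllowed := by
    apply pvTakeWhile_congr
    intro c hcmem
    have hdc : pvDomChar c = true := by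
      have := hDom
      unfold Dom_extract_user_agent_rfc7231 pvDomStr at this
      exact List.all_eq_true.mp this c hcmem
    have hle : c.toNat ≤ 126 := by
      unfold pvDomChar at hdc
      simp at hdc
      omega
    exact pvTokenClass_eq_allowed c hle
  rw [pvALoop_eq, PySem.List.slice_to_natCast, pvReStarMatch_eq_takeWhile, hsame]
  simp [pvTake_length_takeWhile]
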